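-- pv_equiv track=rewrite | github.com/imflash217/d2l-hi | src/utils_nmt.py | preprocess_nmt
-- ===== SOURCE A (Python) =====
-- def no_space(char, prev_char):
--     return char in set(".,!?") and prev_char != " "
--
-- def preprocess_nmt(text):
--     """
--     Preprocess the English-French dataaset.
--     step-1. Replace non-breaking space with space.
--     step-2. Convert uppercase letters to lowercase letters.
--     step-3. Insert space between words and punctuation marks.
--     """
--
--     text = text.replace("\u202f", " ").replace("\xa0", " ")  ## step-1
--     text = text.lower()  ## step-2
--     ## step-3
--     out = [
--         " " + char if i > 0 and no_space(char, text[i - 1]) else char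
--         for i, char in enumerate(text)
--     ]
--     return "".join(out)
-- ===== SOURCE B (Python) =====
-- import re
--
-- def preprocess_nmt(text):
--     """
--     Preprocess the English-French dataset: replace non-breaking spaces,
--     lowercase, then put a space before . , ! ? that directly follow a
--     non-space character.  Step 3 is a single regex substitution instead
--     of the index-based character comprehension.
--     """
--     text = text.replace("\u202f", " ").replace("\xa0", " ").lower()
--     return re.sub(r'(?<=[^ ])([.,!?])', r' \1', text)
-- ===== Notes on version B (the rewrite author's own statement) =====
-- stated objective: faster
-- what changed: Replaced the index-based enumerate comprehension and its no_space helper (which rebuilds the punctuation set and re-indexes text[i-1] at every position) with a single compiled regex substitution whose lookbehind for a preceding non-space character reproduces the prev-char guard.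
import Mathlib
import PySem

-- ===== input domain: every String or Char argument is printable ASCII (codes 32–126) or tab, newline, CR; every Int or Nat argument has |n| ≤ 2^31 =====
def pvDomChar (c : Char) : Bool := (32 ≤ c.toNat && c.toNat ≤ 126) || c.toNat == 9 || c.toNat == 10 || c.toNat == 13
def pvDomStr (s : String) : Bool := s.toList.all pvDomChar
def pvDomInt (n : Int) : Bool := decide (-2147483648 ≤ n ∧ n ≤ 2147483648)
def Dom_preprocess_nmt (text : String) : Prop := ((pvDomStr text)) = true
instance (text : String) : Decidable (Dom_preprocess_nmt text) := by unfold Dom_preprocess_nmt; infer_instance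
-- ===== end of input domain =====

-- B replaces A's enumerate comprehension (no_space helper, text[i-1] lookups, join) by one
-- regex substitution re.sub(r'(?<=[^ ])([.,!?])', r' \1', text); same output.

-- ===== PORT A =====
-- helper no_space(char, prev_char)
def no_space (ch : Char) (prev_char : Char) : Bool :=
  PySem.Set.contains (PySem.Set.ofList ['.', ',', '!', '?']) ch && prev_char != ' '

def preprocess_nmt (text : String) : String :=
  let text1 := PySem.Str.replace (PySem.Str.replace text "\u202f" " ") "\u00A0" " "
  let text2 := PySem.Str.lower text1
  let cs := text2.toList
  -- [" " + char if i > 0 and no_space(char, text[i-1]) else char for i, char in enumerate(text)]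
  -- text[i-1] is always in range when i > 0, so pyGetD with an unused default is exact
  let out := (PySem.List.enumerate cs).map (fun ic =>
    if ic.1 > 0 && no_space ic.2 (PySem.List.pyGetD cs (ic.1 - 1) ' ')
    then String.ofList [' ', ic.2] else String.ofList [ic.2])
  PySem.Str.join "" out

-- ===== PORT B =====
-- Hand port of re.sub(r'(?<=[^ ])([.,!?])', r' \1', t): re.sub scans the subject left to
-- right for non-overlapping matches; a match at a position is a char in [.,!?] whose
-- lookbehind (previous subject char exists and is not ' ') holds, and is replaced by
-- ' ' + that char.  The scan is exact: it carries the previous subject character.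
def reSubScan (prev : Char) : List Char → List Char
  | [] => []
  | ch :: rest =>
      (if ['.', ',', '!', '?'].contains ch && prev != ' ' then [' ', ch] else [ch]) ++ reSubScan ch rest

def preprocess_nmt_alt (text : String) : String :=
  let t := PySem.Str.lower (PySem.Str.replace (PySem.Str.replace text "\u202f" " ") "\u00A0" " ")
  -- at the start of the subject the lookbehind (?<=[^ ]) cannot match: prev = ' ' is exact
  String.ofList (reSubScan ' ' t.toList)

-- ===== PRECONDITION & SPEC =====
def Spec_preprocess_nmt (text : String) (out : String) : Prop := out = preprocess_nmt_alt text
instance (text : String) (out : String) : Decidable (Spec_preprocess_nmt text out) := by unfold Spec_preprocess_nmt; infer_instance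

-- ===== CLAIM (what is proved, stated in full; the proofs are below) =====
def Claim_equal_preprocess_nmt : Prop := ∀ (text : String), Dom_preprocess_nmt text → Spec_preprocess_nmt text (preprocess_nmt text)

-- ===== LEMMAS AND PROOFS =====

-- the common per-character step, parameterised by the previous character
def pnStep (prev ch : Char) : List Char :=
  if ['.', ',', '!', '?'].contains ch && prev != ' ' then [' ', ch] else [ch]

theorem reSubScan_eq_zipWith (cs : List Char) : ∀ p : Char,
    reSubScan p cs = (List.zipWith pnStep (p :: cs) cs).flatten := by
  induction cs with
  | nil => intro p; simp [reSubScan]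
  | cons c rest ih =>
      intro p
      simp [reSubScan, pnStep, ih c]

theorem no_space_eq (ch p : Char) :
    no_space ch p = (['.', ',', '!', '?'].contains ch && p != ' ') := by
  simp [no_space, PySem.Set.ofList]

theorem mapA_eq (cs : List Char) :
    (PySem.List.enumerate cs).map (fun ic =>
      if ic.1 > 0 && no_space ic.2 (PySem.List.pyGetD cs (ic.1 - 1) ' ')
      then String.ofList [' ', ic.2] else String.ofList [ic.2])
    = (List.zipWith pnStep (' ' :: cs) cs).map String.ofList := by
  apply List.ext_getElem
  · simp [PySem.List.length_enumerate]
  · intro i h1 h2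
    have hi : i < cs.length := by simpa [PySem.List.length_enumerate] using h1
    rw [List.getElem_map, List.getElem_map, PySem.List.getElem_enumerate,
        List.getElem_zipWith]
    simp only [zero_add]
    rcases Nat.eq_zero_or_pos i with hz | hp
    · subst hz
      simp [pnStep, no_space_eq]
    · obtain ⟨j, rfl⟩ : ∃ j, i = j + 1 := ⟨i - 1, by omega⟩
      have hj : j < cs.length := by omega
      have hgt : (((j + 1 : Nat) : Int) > 0) = True := by
        simp
      have hcast : ((j + 1 : Nat) : Int) - 1 = ((j : Nat) : Int) := by omega
      have hprev : (' ' :: cs)[j + 1]'(by simpa using Nat.succ_lt_succ hj) = cs[j]'hj := by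
        simp
      rw [hprev, hcast, PySem.List.pyGetD_natCast]
      have hgetD : cs.getD j ' ' = cs[j]'hj := List.getD_eq_getElem cs ' ' hj
      rw [hgetD]
      simp only [hgt, no_space_eq, pnStep, decide_true, Bool.true_and]
      split <;> rfl

theorem intercalate_nil_sep (L : List (List Char)) :
    List.intercalate ([] : List Char) L = L.flatten := by
  induction L with
  | nil => rfl
  | cons a rest ih =>
      cases rest with
      | nil => simp [List.intercalate]
      | cons b r =>
          simp [List.intercalate, List.intersperse] at ih ⊢
          simpa using ih

theorem join_mk (L : List (List Char)) :
    PySem.Str.join "" (L.map String.ofList) = String.ofList L.flatten := by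
  apply String.toList_injective
  simp [PySem.Str.toList_join, PySem.Chars.join, intercalate_nil_sep, Function.comp_def, String.toList_ofList]

-- ===== VERDICT (by name: the statement is the Claim_ definition above) =====
theorem preprocess_nmt_spec : Claim_equal_preprocess_nmt := by
  intro text _
  unfold Spec_preprocess_nmt preprocess_nmt preprocess_nmt_alt
  simp only []
  rw [mapA_eq, join_mk, reSubScan_eq_zipWith]
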